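-- pv_equiv track=rewrite | github.com/jr-cs2004/Network_Analysis | Drosophila Melanogaster/BioGrid/Uniprot_ID_Mapper_From_BioGrid_To_FlyBase.py | remove_proteins_having_the_same_uniprot_id_in_common
-- ===== SOURCE A (Python) =====
-- def remove_proteins_having_the_same_uniprot_id_in_common(biogrid_source_to_uniprot_IDs):
--    proteins_to_be_removed = []
--    index = 0
--    for x in biogrid_source_to_uniprot_IDs[1]:
--       counter = 0
--       for y in biogrid_source_to_uniprot_IDs[1]:
--          if (x == y):
--             counter += 1
--       if (counter > 1):
--          proteins_to_be_removed.append(biogrid_source_to_uniprot_IDs[0][index])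
--       index += 1
--
--    indices_of_proteins_to_be_removed = []
--
--    index = 0
--    for x in biogrid_source_to_uniprot_IDs[0]:
--       if x in set(proteins_to_be_removed):
--          indices_of_proteins_to_be_removed.append(index)
--       index += 1
--
--    for ele in sorted(indices_of_proteins_to_be_removed, reverse = True):
--       del biogrid_source_to_uniprot_IDs[0][ele]
--       del biogrid_source_to_uniprot_IDs[1][ele]
--    return biogrid_source_to_uniprot_IDs
-- ===== SOURCE B (Python) =====
-- def remove_proteins_having_the_same_uniprot_id_in_common(biogrid_source_to_uniprot_IDs):
--     names = biogrid_source_to_uniprot_IDs[0]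
--     ids = biogrid_source_to_uniprot_IDs[1]
--     counts = {}
--     for uid in ids:
--         counts[uid] = counts.get(uid, 0) + 1
--     bad_names = {names[i] for i, uid in enumerate(ids) if counts[uid] > 1}
--     removed = {i for i, n in enumerate(names) if n in bad_names}
--     names[:] = [n for i, n in enumerate(names) if i not in removed]
--     ids[:] = [u for i, u in enumerate(ids) if i not in removed]
--     return biogrid_source_to_uniprot_IDs
-- ===== Notes on version B (the rewrite author's own statement) =====
-- stated objective: alternative
-- what changed: Replaces A's per-element recount inner loop and reverse-sorted one-by-one deletions with a count dictionary built once, a bad-name set, a removed-index set, and single filtering passes written back by slice assignment.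
import Mathlib
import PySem

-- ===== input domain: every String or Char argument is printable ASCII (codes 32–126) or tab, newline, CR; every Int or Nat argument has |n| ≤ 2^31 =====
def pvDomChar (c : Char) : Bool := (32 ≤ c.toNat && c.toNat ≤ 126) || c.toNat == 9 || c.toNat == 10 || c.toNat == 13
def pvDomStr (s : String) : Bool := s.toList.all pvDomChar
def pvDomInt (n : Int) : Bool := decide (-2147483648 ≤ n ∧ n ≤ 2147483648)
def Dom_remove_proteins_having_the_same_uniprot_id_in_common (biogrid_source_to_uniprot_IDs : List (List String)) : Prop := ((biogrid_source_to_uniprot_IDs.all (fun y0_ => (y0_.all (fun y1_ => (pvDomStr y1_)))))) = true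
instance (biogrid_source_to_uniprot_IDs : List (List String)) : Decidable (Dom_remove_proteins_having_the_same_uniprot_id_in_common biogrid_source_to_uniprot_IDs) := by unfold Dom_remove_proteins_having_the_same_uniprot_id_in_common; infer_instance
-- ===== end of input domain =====

-- B replaces A's per-element recount loop and reverse-order one-by-one deletions with a count
-- dictionary, a bad-name set and a removed-index set, rebuilding both lists in one filtering
-- pass (alternative algorithm); both Pythons mutate the two inner lists in place the same way,
-- and the equivalence proved here is about the RETURN value.

-- ===== PORT A =====
-- Option threads IndexError (none); on an index error the port returns the input unchanged
-- (unreachable under Pre_).  'del lst[ele]' is ported as PySem.List.pop? discarding the value (exact).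
def remove_proteins_having_the_same_uniprot_id_in_common (biogrid_source_to_uniprot_IDs : List (List String)) : List (List String) :=
  match PySem.List.pyGet? biogrid_source_to_uniprot_IDs 0, PySem.List.pyGet? biogrid_source_to_uniprot_IDs 1 with
  | some names, some ids =>
    let ptbr? : Option (List String) :=
      (PySem.List.enumerate ids).foldl (fun acc ix =>
        acc.bind (fun l =>
          let counter : Int := ids.foldl (fun c y => if ix.2 == y then c + 1 else c) 0
          if counter > 1 then (PySem.List.pyGet? names ix.1).map (fun nm => l ++ [nm]) else some l))
        (some [])
    match ptbr? with
    | some proteins_to_be_removed =>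
      let idxs : List Int :=
        (PySem.List.enumerate names).foldl (fun acc ix =>
          if (PySem.Set.ofList proteins_to_be_removed).contains ix.2 then acc ++ [ix.1] else acc) []
      let res? : Option (List String × List String) :=
        (PySem.List.sorted idxs (fun i => i) true).foldl (fun st ele =>
          st.bind (fun p =>
            match PySem.List.pop? p.1 ele, PySem.List.pop? p.2 ele with
            | some r1, some r2 => some (r1.2, r2.2)
            | _, _ => none)) (some (names, ids))
      match res? with
      | some p => (biogrid_source_to_uniprot_IDs.set 0 p.1).set 1 p.2
      | none => biogrid_source_to_uniprot_IDs
    | none => biogrid_source_to_uniprot_IDs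
  | _, _ => biogrid_source_to_uniprot_IDs

-- ===== PORT B =====
def remove_proteins_having_the_same_uniprot_id_in_common_alt (biogrid_source_to_uniprot_IDs : List (List String)) : List (List String) :=
  (((PySem.List.pyGet? biogrid_source_to_uniprot_IDs 0).bind (fun names =>
    (PySem.List.pyGet? biogrid_source_to_uniprot_IDs 1).bind (fun ids =>
      let counts : PySem.Dict String Int :=
        ids.foldl (fun d uid => d.insert uid (d.getD uid 0 + 1)) PySem.Dict.empty
      let bad? : Option (PySem.Set String) :=
        (PySem.List.enumerate ids).foldl (fun acc ix =>
          acc.bind (fun s =>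
            if counts.getD ix.2 0 > 1 then (PySem.List.pyGet? names ix.1).map (PySem.Set.add s) else some s))
          (some PySem.Set.empty)
      bad?.map (fun bad_names =>
        let removed : PySem.Set Int :=
          (PySem.List.enumerate names).foldl (fun s p =>
            if PySem.Set.contains bad_names p.2 then PySem.Set.add s p.1 else s) PySem.Set.empty
        (biogrid_source_to_uniprot_IDs.set 0
            (((PySem.List.enumerate names).filter (fun p => !(PySem.Set.contains removed p.1))).map Prod.snd)).set 1
            (((PySem.List.enumerate ids).filter (fun p => !(PySem.Set.contains removed p.1))).map Prod.snd)))))).getD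
    biogrid_source_to_uniprot_IDs

-- ===== PRECONDITION & SPEC =====
-- helper shared by Pre_ and the proofs: the names at duplicate-ID positions (a plain comprehension)
def pvPtbrOf (names ids : List String) (en : List (Int × String)) : List String :=
  (en.filter (fun p => decide ((ids.count p.2 : Int) > 1))).map (fun p => PySem.List.pyGetD names p.1 "")

def pvPtbr (names ids : List String) : List String :=
  pvPtbrOf names ids (PySem.List.enumerate ids)

-- Pre_ is exactly where A returns normally: the argument has the two inner lists (else
-- IndexError on biogrid_source_to_uniprot_IDs[1]), every duplicate-ID position has a name
-- (else IndexError on names[index]), and every to-be-removed name position lies inside the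
-- ID list (else IndexError on the 'del ...[ele]' of the second list).
def Pre_remove_proteins_having_the_same_uniprot_id_in_common (biogrid_source_to_uniprot_IDs : List (List String)) : Prop :=
  2 ≤ biogrid_source_to_uniprot_IDs.length ∧
  (∀ i : Nat, i < (biogrid_source_to_uniprot_IDs.getD 1 []).length →
    1 < (biogrid_source_to_uniprot_IDs.getD 1 []).count ((biogrid_source_to_uniprot_IDs.getD 1 []).getD i "") →
    i < (biogrid_source_to_uniprot_IDs.getD 0 []).length) ∧
  (∀ i : Nat, i < (biogrid_source_to_uniprot_IDs.getD 0 []).length →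
    (biogrid_source_to_uniprot_IDs.getD 0 []).getD i "" ∈
      pvPtbr (biogrid_source_to_uniprot_IDs.getD 0 []) (biogrid_source_to_uniprot_IDs.getD 1 []) →
    i < (biogrid_source_to_uniprot_IDs.getD 1 []).length)
instance (biogrid_source_to_uniprot_IDs : List (List String)) : Decidable (Pre_remove_proteins_having_the_same_uniprot_id_in_common biogrid_source_to_uniprot_IDs) := by unfold Pre_remove_proteins_having_the_same_uniprot_id_in_common; infer_instance
def pvWitness_remove_proteins_having_the_same_uniprot_id_in_common : List (List String) := [["p1", "p2", "p3"], ["u", "u", "v"]]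

def Spec_remove_proteins_having_the_same_uniprot_id_in_common (biogrid_source_to_uniprot_IDs : List (List String)) (out : List (List String)) : Prop := out = remove_proteins_having_the_same_uniprot_id_in_common_alt biogrid_source_to_uniprot_IDs
instance (biogrid_source_to_uniprot_IDs : List (List String)) (out : List (List String)) : Decidable (Spec_remove_proteins_having_the_same_uniprot_id_in_common biogrid_source_to_uniprot_IDs out) := by unfold Spec_remove_proteins_having_the_same_uniprot_id_in_common; infer_instance

-- ===== CLAIM (what is proved, stated in full; the proofs are below) =====
def Claim_equal_remove_proteins_having_the_same_uniprot_id_in_common : Prop := ∀ (biogrid_source_to_uniprot_IDs : List (List String)), Dom_remove_proteins_having_the_same_uniprot_id_in_common biogrid_source_to_uniprot_IDs → Pre_remove_proteins_having_the_same_uniprot_id_in_common biogrid_source_to_uniprot_IDs → Spec_remove_proteins_having_the_same_uniprot_id_in_common biogrid_source_to_uniprot_IDs (remove_proteins_having_the_same_uniprot_id_in_common biogrid_source_to_uniprot_IDs)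

-- ===== LEMMAS AND PROOFS =====

-- the indices (into ns) whose element satisfies Q, in increasing order
def pvIdxsOf (Q : String → Bool) (ns : List String) : List Int :=
  ((PySem.List.enumerate ns).filter (fun p => Q p.2)).map (fun p => p.1)

-- the elements of l whose index is not in J
def pvKeep (l : List String) (J : List Int) : List String :=
  ((PySem.List.enumerate l).filter (fun p => !(PySem.Set.ofList J).contains p.1)).map Prod.snd

theorem pvCounter_eq (v : String) (l : List String) :
    ∀ (a : Int), l.foldl (fun c y => if v == y then c + 1 else c) a = a + (l.count v : Int) := by
  induction l with
  | nil => intro a; simp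
  | cons y l ih =>
    intro a
    rw [List.foldl_cons]
    by_cases h : v = y
    · subst h
      rw [if_pos (by simp), ih, List.count_cons_self]
      push_cast
      ring
    · rw [if_neg (by simpa using h), ih]
      simp [List.count_cons, (by simp [Ne.symm h] : (y == v) = false)]

theorem pvGet?_eq_some_getD (xs : List String) (i : Int) (h0 : 0 ≤ i) (h1 : i < (xs.length : Int)) :
    PySem.List.pyGet? xs i = some (PySem.List.pyGetD xs i "") := by
  rw [PySem.List.pyGet?_eq_some_getElem xs h0 h1, PySem.List.pyGetD_eq_getElem xs "" h0 h1]

-- A's first loop collects pvPtbrOf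
theorem pvA_collect (names ids : List String) :
    ∀ (en : List (Int × String)) (acc : List String),
      (∀ p ∈ en, 1 < ids.count p.2 → 0 ≤ p.1 ∧ p.1 < (names.length : Int)) →
      en.foldl (fun acc ix =>
          acc.bind (fun l =>
            let counter : Int := ids.foldl (fun c y => if ix.2 == y then c + 1 else c) 0
            if counter > 1 then (PySem.List.pyGet? names ix.1).map (fun nm => l ++ [nm]) else some l))
        (some acc)
      = some (acc ++ pvPtbrOf names ids en) := by
  intro en
  induction en with
  | nil => intro acc _; simp [pvPtbrOf]
  | cons p en ih =>
    intro acc h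
    simp only [List.foldl_cons, Option.bind_some]
    rw [pvCounter_eq]
    by_cases hg : 1 < ids.count p.2
    · have hp := h p (by simp) hg
      rw [if_pos (by omega), pvGet?_eq_some_getD names p.1 hp.1 hp.2]
      simp only [Option.map_some]
      rw [ih _ (fun q hq => h q (by simp [hq]))]
      simp [pvPtbrOf, List.filter_cons, hg]
    · rw [if_neg (by omega), ih _ (fun q hq => h q (by simp [hq]))]
      simp [pvPtbrOf, List.filter_cons, hg]

-- B's set comprehension collects the same list into a PySem.Set
theorem pvB_collect (names ids : List String) :
    ∀ (en : List (Int × String)) (s : PySem.Set String),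
      (∀ p ∈ en, 1 < ids.count p.2 → 0 ≤ p.1 ∧ p.1 < (names.length : Int)) →
      en.foldl (fun acc ix =>
          acc.bind (fun s =>
            if (ids.foldl (fun d uid => d.insert uid (d.getD uid 0 + 1)) (PySem.Dict.empty : PySem.Dict String Int)).getD ix.2 0 > 1
            then (PySem.List.pyGet? names ix.1).map (PySem.Set.add s) else some s))
        (some s)
      = some ((pvPtbrOf names ids en).foldl PySem.Set.add s) := by
  intro en
  induction en with
  | nil => intro s _; simp [pvPtbrOf]
  | cons p en ih =>
    intro s h
    have hc : (ids.foldl (fun d uid => d.insert uid (d.getD uid 0 + 1)) (PySem.Dict.empty : PySem.Dict String Int)).getD p.2 0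
        = (ids.count p.2 : Int) := by
      rw [PySem.Dict.getD_foldl_insert_add_one, PySem.Dict.getD_empty]
      simp
    simp only [List.foldl_cons, Option.bind_some]
    by_cases hg : 1 < ids.count p.2
    · have hp := h p (by simp) hg
      have hcond : (ids.foldl (fun d uid => d.insert uid (d.getD uid 0 + 1)) (PySem.Dict.empty : PySem.Dict String Int)).getD p.2 0 > 1 := by
        rw [hc]; exact_mod_cast hg
      rw [if_pos hcond, pvGet?_eq_some_getD names p.1 hp.1 hp.2]
      simp only [Option.map_some]
      rw [ih _ (fun q hq => h q (by simp [hq]))]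
      simp [pvPtbrOf, List.filter_cons, hg]
    · have hcond : ¬ ((ids.foldl (fun d uid => d.insert uid (d.getD uid 0 + 1)) (PySem.Dict.empty : PySem.Dict String Int)).getD p.2 0 > 1) := by
        rw [hc]; omega
      rw [if_neg hcond, ih _ (fun q hq => h q (by simp [hq]))]
      simp [pvPtbrOf, List.filter_cons, hg]

theorem pvEnumerate_shift {α : Type} (xs : List α) (s : Int) :
    PySem.List.enumerate xs (s + 1) = (PySem.List.enumerate xs s).map (fun p => (p.1 + 1, p.2)) := by
  induction xs generalizing s with
  | nil => simp [PySem.List.enumerate_nil]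
  | cons x xs ih =>
    rw [PySem.List.enumerate_cons, PySem.List.enumerate_cons, List.map_cons, ← ih]

theorem pvIdxsOf_cons (Q : String → Bool) (n : String) (ns : List String) :
    pvIdxsOf Q (n :: ns) = (if Q n then [(0:Int)] else []) ++ (pvIdxsOf Q ns).map (· + 1) := by
  unfold pvIdxsOf
  rw [PySem.List.enumerate_cons, pvEnumerate_shift ns 0]
  rw [List.filter_cons, List.filter_map]
  by_cases h : Q n <;> simp [h, Function.comp_def]

theorem pvMem_idxsOf_nonneg (Q : String → Bool) (ns : List String) (j : Int) (h : j ∈ pvIdxsOf Q ns) :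
    0 ≤ j := by
  unfold pvIdxsOf at h
  obtain ⟨p, hp, rfl⟩ := List.mem_map.mp h
  have := (PySem.List.mem_enumerate_iff ns 0 p).mp (List.mem_of_mem_filter hp)
  obtain ⟨k, hk, rfl⟩ := this
  simp

theorem pvPairwise_lt_idxsOf (Q : String → Bool) (ns : List String) :
    (pvIdxsOf Q ns).Pairwise (· < ·) := by
  unfold pvIdxsOf
  rw [List.pairwise_map]
  exact (PySem.List.pairwise_lt_enumerate ns 0).filter _

theorem pvIdxs_fold (s : PySem.Set String) :
    ∀ (en : List (Int × String)) (acc : List Int),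
      en.foldl (fun acc ix => if s.contains ix.2 then acc ++ [ix.1] else acc) acc
        = acc ++ (en.filter (fun p => s.contains p.2)).map (fun p => p.1) := by
  intro en
  induction en with
  | nil => intro acc; simp
  | cons p en ih =>
    intro acc
    rw [List.foldl_cons]
    by_cases hp : s.contains p.2 = true
    · have hm : p.2 ∈ s := by simpa using hp
      rw [if_pos hp, ih]
      simp [List.filter_cons, hm]
    · have hm : p.2 ∉ s := by simpa using hp
      rw [if_neg hp, ih]
      simp [List.filter_cons, hm]

-- B's removed-index set comprehension
theorem pvRemoved_fold (C : String → Bool) :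
    ∀ (en : List (Int × String)) (s : PySem.Set Int),
      en.foldl (fun s p => if C p.2 then PySem.Set.add s p.1 else s) s
        = ((en.filter (fun p => C p.2)).map (fun p => p.1)).foldl PySem.Set.add s := by
  intro en
  induction en with
  | nil => intro s; simp
  | cons p en ih =>
    intro s
    rw [List.foldl_cons]
    by_cases hp : C p.2 = true
    · rw [if_pos hp, ih]
      simp [List.filter_cons, hp]
    · rw [if_neg hp, ih]
      simp [List.filter_cons, hp]

-- pvKeep facts
theorem pvKeep_nil (J : List Int) : pvKeep [] J = [] := by
  simp [pvKeep, PySem.List.enumerate_nil]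

theorem pvKeep_empty (l : List String) : pvKeep l [] = l := by
  unfold pvKeep
  have : ∀ p ∈ PySem.List.enumerate l 0, (!(PySem.Set.ofList ([] : List Int)).contains p.1) = true := by
    intro p _; simp [PySem.Set.ofList]
  rw [List.filter_eq_self.mpr this, PySem.List.map_snd_enumerate]

theorem pvKeep_cons (a : String) (l : List String) (b : Bool) (J : List Int)
    (hJ : ∀ j ∈ J, 0 ≤ j) :
    pvKeep (a :: l) ((if b then [(0:Int)] else []) ++ J.map (· + 1))
      = (if b then [] else [a]) ++ pvKeep l J := by
  unfold pvKeep
  rw [PySem.List.enumerate_cons, pvEnumerate_shift l 0, List.filter_cons]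
  have h0 : ((0:Int) ∈ (if b then [(0:Int)] else []) ++ J.map (· + 1)) ↔ b = true := by
    cases b <;> simp
    intro j hj
    have := hJ j hj
    omega
  have hcond0 : (!(PySem.Set.ofList ((if b then [(0:Int)] else []) ++ J.map (· + 1))).contains (0:Int)) = !b := by
    cases b <;> simp_all [PySem.Set.mem_ofList]
  have htail : ((PySem.List.enumerate l 0).map (fun p => (p.1 + 1, p.2))).filter
        (fun p => !(PySem.Set.ofList ((if b then [(0:Int)] else []) ++ J.map (· + 1))).contains p.1)
      = ((PySem.List.enumerate l 0).filter (fun p => !(PySem.Set.ofList J).contains p.1)).map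
        (fun p => (p.1 + 1, p.2)) := by
    rw [List.filter_map]
    congr 1
    apply List.filter_congr
    intro p hp
    obtain ⟨k, hk, rfl⟩ := (PySem.List.mem_enumerate_iff l 0 p).mp hp
    simp only [Function.comp_def]
    have hmem : ((0 + (k:Int) + 1) ∈ (if b then [(0:Int)] else []) ++ J.map (· + 1)) ↔ ((0 + (k:Int)) ∈ J) := by
      constructor
      · intro hm
        rcases List.mem_append.mp hm with hm | hm
        · cases b <;> simp_all
          omega
        · obtain ⟨j, hj, hje⟩ := List.mem_map.mp hm
          have : j = 0 + (k:Int) := by omega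
          rwa [← this]
      · intro hm
        exact List.mem_append.mpr (Or.inr (List.mem_map.mpr ⟨0 + (k:Int), hm, rfl⟩))
    simp only [PySem.Set.contains_eq_listContains]
    simp only [PySem.Set.mem_ofList] at hmem ⊢
    simp [hmem]
    intro _
    right
    omega
  rw [htail]
  cases b <;> simp [hcond0, List.map_map, Function.comp_def]
  rw [if_pos (by intro x hx; have := hJ x hx; omega)]
  simp [List.map_map, Function.comp_def]

-- the deletion loop body of A, named for the proofs
def pvDelStep (st : Option (List String × List String)) (ele : Int) : Option (List String × List String) :=
  st.bind (fun p =>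
    match PySem.List.pop? p.1 ele, PySem.List.pop? p.2 ele with
    | some r1, some r2 => some (r1.2, r2.2)
    | _, _ => none)

theorem pvFoldl_delStep_none (J : List Int) : J.foldl pvDelStep none = none := by
  induction J with
  | nil => rfl
  | cons j J ih => simpa [pvDelStep] using ih

theorem pvPop?_cons_succ {α : Type} (a : α) (l : List α) (j : Int) (hj : 0 ≤ j) :
    PySem.List.pop? (a :: l) (j + 1) = (PySem.List.pop? l j).map (fun r => (r.1, a :: r.2)) := by
  have h1 : PySem.List.pyIdx? (a :: l).length (j + 1)
      = (PySem.List.pyIdx? l.length j).map (· + 1) := by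
    simp only [PySem.List.pyIdx?, List.length_cons]
    split_ifs <;> (try simp_all) <;> omega
  simp only [PySem.List.pop?, h1]
  cases hk : PySem.List.pyIdx? l.length j with
  | none => rfl
  | some k =>
    simp only [Option.map_some, Option.bind_some]
    simp only [List.getElem?_cons_succ, List.eraseIdx_cons_succ]
    cases hx : l[k]? <;> simp

theorem pvFoldl_delStep_shift (J : List Int) (a b : String) :
    ∀ (l m : List String), (∀ j ∈ J, 0 ≤ j) →
    (J.map (· + 1)).foldl pvDelStep (some (a :: l, b :: m))
      = Option.map (fun p => (a :: p.1, b :: p.2)) (J.foldl pvDelStep (some (l, m))) := by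
  induction J with
  | nil => intro l m _; simp
  | cons j J ih =>
    intro l m hJ
    have hj : 0 ≤ j := hJ j (by simp)
    simp only [List.map_cons, List.foldl_cons]
    have h1 : pvDelStep (some (a :: l, b :: m)) (j + 1)
        = Option.map (fun p => (a :: p.1, b :: p.2)) (pvDelStep (some (l, m)) j) := by
      simp only [pvDelStep, Option.bind_some]
      rw [pvPop?_cons_succ a l j hj, pvPop?_cons_succ b m j hj]
      cases PySem.List.pop? l j <;> cases PySem.List.pop? m j <;> simp
    rw [h1]
    cases hs : pvDelStep (some (l, m)) j with
    | none => simp [pvFoldl_delStep_none]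
    | some p => exact ih p.1 p.2 (fun x hx => hJ x (by simp [hx]))

-- A's reverse-order deletions at the Q-positions of ns remove exactly those index positions
-- from both lists (ms may be shorter or longer than ns; every deleted index must be in range)
theorem pvFoldl_delStep_idxs (Q : String → Bool) :
    ∀ (ns ms : List String),
    (∀ j ∈ pvIdxsOf Q ns, j < (ms.length : Int)) →
    ((pvIdxsOf Q ns).reverse).foldl pvDelStep (some (ns, ms))
      = some (pvKeep ns (pvIdxsOf Q ns), pvKeep ms (pvIdxsOf Q ns)) := by
  intro ns
  induction ns with
  | nil =>
    intro ms _
    simp only [pvIdxsOf, PySem.List.enumerate_nil, List.filter_nil, List.map_nil,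
      List.reverse_nil, List.foldl_nil]
    rw [pvKeep_nil, pvKeep_empty]
  | cons n ns ih =>
    intro ms hlt
    cases ms with
    | nil =>
      have hempty : pvIdxsOf Q (n :: ns) = [] := by
        cases hidx : pvIdxsOf Q (n :: ns) with
        | nil => rfl
        | cons j J =>
          have hj0 : 0 ≤ j := pvMem_idxsOf_nonneg Q (n :: ns) j (by rw [hidx]; simp)
          have := hlt j (by rw [hidx]; simp)
          simp at this
          omega
      rw [hempty]
      simp only [List.reverse_nil, List.foldl_nil]
      rw [pvKeep_empty, pvKeep_nil]
    | cons m ms =>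
      have hnonneg : ∀ j ∈ (pvIdxsOf Q ns).reverse, 0 ≤ j :=
        fun j hj => pvMem_idxsOf_nonneg Q ns j (List.mem_reverse.mp hj)
      have hlt' : ∀ j ∈ pvIdxsOf Q ns, j < (ms.length : Int) := by
        intro j hj
        have hmem : (j + 1) ∈ pvIdxsOf Q (n :: ns) := by
          rw [pvIdxsOf_cons]
          exact List.mem_append.mpr (Or.inr (List.mem_map.mpr ⟨j, hj, rfl⟩))
        have := hlt (j + 1) hmem
        simp only [List.length_cons] at this
        push_cast at this
        omega
      rw [pvIdxsOf_cons, List.reverse_append, ← List.map_reverse, List.foldl_append]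
      rw [pvFoldl_delStep_shift _ n m ns ms hnonneg]
      rw [ih ms hlt']
      rw [pvKeep_cons n ns (Q n) (pvIdxsOf Q ns) (pvMem_idxsOf_nonneg Q ns),
        pvKeep_cons m ms (Q n) (pvIdxsOf Q ns) (pvMem_idxsOf_nonneg Q ns)]
      by_cases hq : Q n
      · simp [hq, pvDelStep, PySem.List.pop?_zero_cons]
      · simp [hq]

-- both ports on an input of the admitted shape
theorem pvA_on (x0 x1 : List String) (rest : List (List String))
    (h1 : ∀ p ∈ PySem.List.enumerate x1 0, 1 < x1.count p.2 → 0 ≤ p.1 ∧ p.1 < (x0.length : Int))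
    (h2 : ∀ j ∈ pvIdxsOf (fun x => (PySem.Set.ofList (pvPtbr x0 x1)).contains x) x0, j < (x1.length : Int)) :
    remove_proteins_having_the_same_uniprot_id_in_common (x0 :: x1 :: rest)
      = (((x0 :: x1 :: rest).set 0
            (pvKeep x0 (pvIdxsOf (fun x => (PySem.Set.ofList (pvPtbr x0 x1)).contains x) x0))).set 1
            (pvKeep x1 (pvIdxsOf (fun x => (PySem.Set.ofList (pvPtbr x0 x1)).contains x) x0))) := by
  have hget0 : PySem.List.pyGet? (x0 :: x1 :: rest) 0 = some x0 := by
    rw [show ((0:Int)) = ((0:Nat):Int) from rfl, PySem.List.pyGet?_natCast]; rfl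
  have hget1 : PySem.List.pyGet? (x0 :: x1 :: rest) 1 = some x1 := by
    rw [show ((1:Int)) = ((1:Nat):Int) from rfl, PySem.List.pyGet?_natCast]; rfl
  unfold remove_proteins_having_the_same_uniprot_id_in_common
  rw [hget0, hget1]
  simp only
  rw [pvA_collect x0 x1 (PySem.List.enumerate x1 0) [] h1]
  simp only
  rw [pvIdxs_fold]
  simp only [List.nil_append]
  rw [show ((PySem.List.enumerate x0).filter
        (fun p => (PySem.Set.ofList (pvPtbrOf x0 x1 (PySem.List.enumerate x1))).contains p.2)).map (fun p => p.1)
      = pvIdxsOf (fun x => (PySem.Set.ofList (pvPtbr x0 x1)).contains x) x0 from rfl]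
  rw [PySem.List.sorted_rev_eq_of_perm_of_pairwise_gt _ _ _
      (List.reverse_perm _)
      (by rw [List.pairwise_reverse]; exact pvPairwise_lt_idxsOf _ x0)]
  rw [show (fun st ele => st.bind (fun (p : List String × List String) =>
        match PySem.List.pop? p.1 ele, PySem.List.pop? p.2 ele with
        | some r1, some r2 => some (r1.2, r2.2)
        | _, _ => none)) = pvDelStep from rfl]
  rw [pvFoldl_delStep_idxs _ x0 x1 h2]

theorem pvB_on (x0 x1 : List String) (rest : List (List String))
    (h1 : ∀ p ∈ PySem.List.enumerate x1 0, 1 < x1.count p.2 → 0 ≤ p.1 ∧ p.1 < (x0.length : Int)) :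
    remove_proteins_having_the_same_uniprot_id_in_common_alt (x0 :: x1 :: rest)
      = (((x0 :: x1 :: rest).set 0
            (pvKeep x0 (pvIdxsOf (fun x => (PySem.Set.ofList (pvPtbr x0 x1)).contains x) x0))).set 1
            (pvKeep x1 (pvIdxsOf (fun x => (PySem.Set.ofList (pvPtbr x0 x1)).contains x) x0))) := by
  have hget0 : PySem.List.pyGet? (x0 :: x1 :: rest) 0 = some x0 := by
    rw [show ((0:Int)) = ((0:Nat):Int) from rfl, PySem.List.pyGet?_natCast]; rfl
  have hget1 : PySem.List.pyGet? (x0 :: x1 :: rest) 1 = some x1 := by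
    rw [show ((1:Int)) = ((1:Nat):Int) from rfl, PySem.List.pyGet?_natCast]; rfl
  unfold remove_proteins_having_the_same_uniprot_id_in_common_alt
  rw [hget0, hget1]
  simp only [Option.bind_some]
  rw [pvB_collect x0 x1 (PySem.List.enumerate x1 0) PySem.Set.empty h1]
  simp only [Option.map_some, Option.getD_some]
  rw [show (pvPtbrOf x0 x1 (PySem.List.enumerate x1 0)).foldl PySem.Set.add PySem.Set.empty
      = PySem.Set.ofList (pvPtbr x0 x1) from (PySem.Set.ofList_eq_foldl _).symm]
  rw [pvRemoved_fold _ (PySem.List.enumerate x0) PySem.Set.empty]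
  rw [show (((PySem.List.enumerate x0).filter
        (fun p => (PySem.Set.ofList (pvPtbr x0 x1)).contains p.2)).map (fun p => p.1)).foldl PySem.Set.add PySem.Set.empty
      = (pvIdxsOf (fun x => (PySem.Set.ofList (pvPtbr x0 x1)).contains x) x0).foldl PySem.Set.add PySem.Set.empty from rfl]
  rw [show (pvIdxsOf (fun x => (PySem.Set.ofList (pvPtbr x0 x1)).contains x) x0).foldl PySem.Set.add PySem.Set.empty
      = PySem.Set.ofList (pvIdxsOf (fun x => (PySem.Set.ofList (pvPtbr x0 x1)).contains x) x0)
      from (PySem.Set.ofList_eq_foldl _).symm]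
  rfl

-- ===== VERDICT (by name: the statement is the Claim_ definition above) =====
theorem remove_proteins_having_the_same_uniprot_id_in_common_spec : Claim_equal_remove_proteins_having_the_same_uniprot_id_in_common := by
  intro xs _ hpre
  unfold Spec_remove_proteins_having_the_same_uniprot_id_in_common
  obtain ⟨hlen2, hc1, hc2⟩ := hpre
  match xs with
  | x0 :: x1 :: rest =>
    simp only [List.getD_cons_zero, List.getD_cons_succ] at hc1 hc2
    have h1 : ∀ p ∈ PySem.List.enumerate x1 0, 1 < x1.count p.2 → 0 ≤ p.1 ∧ p.1 < (x0.length : Int) := by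
      intro p hp hcnt
      obtain ⟨k, hk, rfl⟩ := (PySem.List.mem_enumerate_iff x1 0 p).mp hp
      refine ⟨by simp, ?_⟩
      have := hc1 k hk (by rwa [List.getD_eq_getElem x1 "" hk])
      simp only [zero_add]
      exact_mod_cast this
    have h2 : ∀ j ∈ pvIdxsOf (fun x => (PySem.Set.ofList (pvPtbr x0 x1)).contains x) x0, j < (x1.length : Int) := by
      intro j hj
      unfold pvIdxsOf at hj
      obtain ⟨p, hp, rfl⟩ := List.mem_map.mp hj
      have hmem := List.mem_of_mem_filter hp
      have hcond := List.of_mem_filter hp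
      obtain ⟨k, hk, rfl⟩ := (PySem.List.mem_enumerate_iff x0 0 p).mp hmem
      simp only at hcond
      have hin : x0[k] ∈ pvPtbr x0 x1 := by
        have := (PySem.Set.contains_iff _ _).mp hcond
        rwa [PySem.Set.mem_ofList] at this
      have := hc2 k hk (by rwa [List.getD_eq_getElem x0 "" hk])
      simp only [zero_add]
      exact_mod_cast this
    rw [pvA_on x0 x1 rest h1 h2, pvB_on x0 x1 rest h1]
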